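-- pv_equiv track=rewrite | github.com/silentE3/groupCapstone | app/core.py | get_min_max_num_groups
-- ===== SOURCE A (Python) =====
-- def get_min_max_num_groups(survey_data: list, target_group_size: int, target_plus_one_allowed: bool, target_minus_one_allowed: bool) -> list[int]:
--     '''
--     Function for determining the number of groups that the
--         students can be seperated into based upon the number of students
--         and the target group size (+1 and/or -1, as applicable).
--     Returns an empty list if it is not possible to adhere to the target group
--         size and the allowed margin (e.g. target = 6 with a +/-1 margin and 8 total students)
--     Returns [min, max] values otherwise
--     '''
--     # calculate the number of groups based on number of students and target group size +/- the
--     #  allowable margin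
--
--     if target_group_size <= 0 or len(survey_data) < 1:
--         # protection from invalid group size input and survey data input
--         return []
--
--     min_max_num_groups: list[int] = []
--
--     # min possible number groups focusing on max allowable group size
--     max_group_size: int = target_group_size + \
--         1 if target_plus_one_allowed else target_group_size
--     min_max_num_groups.append(-(-len(survey_data) // (max_group_size)))
--
--     # max possible number groups focusing on min allowable group size
--     min_group_size: int = target_group_size
--     if target_minus_one_allowed and (target_group_size - 1) > 0:
--         min_group_size -= 1
--     min_max_num_groups.append(len(survey_data)//(min_group_size))
--
--     # make sure it is possible to create [min, max] num of groups while
--     # adhering to target group size and the allowable margin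
--     for num_groups in range(min_max_num_groups[0], min_max_num_groups[1] + 1):
--         if not ((min_group_size * num_groups <= len(survey_data)) and
--                 (max_group_size * num_groups >= len(survey_data))):
--             return []  # not possible to adhere to target group size and the allowable margin
--     # if minimum num groups > max num groups, then not possible
--     if min_max_num_groups[0] > min_max_num_groups[1]:
--         return []  # not possible to adhere to target group size and the allowable margin
--
--     return min_max_num_groups
-- ===== SOURCE B (Python) =====
-- def get_min_max_num_groups(survey_data: list, target_group_size: int, target_plus_one_allowed: bool, target_minus_one_allowed: bool) -> list[int]:
--     # Derive the answer directly from the feasibility predicate: a group count g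
--     # works iff min_size*g <= len(survey_data) <= max_size*g. Scan all candidate
--     # counts and return the smallest and largest feasible ones (no division at all).
--     n = len(survey_data)
--     if target_group_size <= 0 or n < 1:
--         return []
--     max_size = target_group_size + 1 if target_plus_one_allowed else target_group_size
--     min_size = target_group_size - 1 if target_minus_one_allowed and target_group_size > 1 else target_group_size
--     feasible = [g for g in range(1, n + 1) if min_size * g <= n <= max_size * g]
--     return [feasible[0], feasible[-1]] if feasible else []
-- ===== Notes on version B (the rewrite author's own statement) =====
-- stated objective: alternative
-- what changed: B performs no division at all: instead of computing ceil/floor division endpoints and then verifying them with a loop, it scans candidate group counts 1..n, filters by the feasibility predicate min_size*g <= n <= max_size*g, and returns the first and last feasible count.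
import Mathlib
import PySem

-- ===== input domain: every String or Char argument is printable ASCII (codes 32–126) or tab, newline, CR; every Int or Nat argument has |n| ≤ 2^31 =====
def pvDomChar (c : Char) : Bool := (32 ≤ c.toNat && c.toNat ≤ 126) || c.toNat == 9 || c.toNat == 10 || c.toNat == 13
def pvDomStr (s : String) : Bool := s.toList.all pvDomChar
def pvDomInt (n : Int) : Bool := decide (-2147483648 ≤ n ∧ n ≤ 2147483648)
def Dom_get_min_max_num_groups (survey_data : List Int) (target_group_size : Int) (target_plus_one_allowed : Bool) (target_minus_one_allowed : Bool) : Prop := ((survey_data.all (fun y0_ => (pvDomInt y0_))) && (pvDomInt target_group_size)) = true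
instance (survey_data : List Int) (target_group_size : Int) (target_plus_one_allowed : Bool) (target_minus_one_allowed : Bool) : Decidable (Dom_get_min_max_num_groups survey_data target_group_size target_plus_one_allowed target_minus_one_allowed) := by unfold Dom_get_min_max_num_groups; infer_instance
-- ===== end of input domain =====

-- B computes the answer with no division: it filters candidate group counts 1..n by the feasibility predicate and returns the first and last (alternative algorithm, same cost class).


-- ===== PORT A =====
def get_min_max_num_groups (survey_data : List Int) (target_group_size : Int) (target_plus_one_allowed : Bool) (target_minus_one_allowed : Bool) : List Int :=
  if target_group_size ≤ 0 ∨ survey_data.length < 1 then []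
  else
    let max_group_size : Int := if target_plus_one_allowed then target_group_size + 1 else target_group_size
    let mn : Int := -(PySem.Int.floordiv (-(survey_data.length : Int)) max_group_size)
    let min_group_size : Int :=
      if target_minus_one_allowed ∧ target_group_size - 1 > 0 then target_group_size - 1 else target_group_size
    let mx : Int := PySem.Int.floordiv (survey_data.length : Int) min_group_size
    if (PySem.List.pyRange mn (mx + 1) 1).any
        (fun num_groups => decide (¬ ((min_group_size * num_groups ≤ (survey_data.length : Int)) ∧
                                      (max_group_size * num_groups ≥ (survey_data.length : Int))))) then []
    else if mn > mx then []
    else [mn, mx]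

-- ===== PORT B =====
def get_min_max_num_groups_alt (survey_data : List Int) (target_group_size : Int) (target_plus_one_allowed : Bool) (target_minus_one_allowed : Bool) : List Int :=
  let n : Int := (survey_data.length : Int)
  if target_group_size ≤ 0 ∨ n < 1 then []
  else
    let max_size : Int := if target_plus_one_allowed then target_group_size + 1 else target_group_size
    let min_size : Int := if target_minus_one_allowed ∧ target_group_size > 1 then target_group_size - 1 else target_group_size
    let feasible : List Int :=
      (PySem.List.pyRange 1 (n + 1) 1).filter
        (fun g => decide (min_size * g ≤ n ∧ n ≤ max_size * g))
    match feasible with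
    | [] => []
    | x :: xs => [x, (x :: xs).getLast (by simp)]

-- ===== PRECONDITION & SPEC =====
def Spec_get_min_max_num_groups (survey_data : List Int) (target_group_size : Int) (target_plus_one_allowed : Bool) (target_minus_one_allowed : Bool) (out : List Int) : Prop := out = get_min_max_num_groups_alt survey_data target_group_size target_plus_one_allowed target_minus_one_allowed
instance (survey_data : List Int) (target_group_size : Int) (target_plus_one_allowed : Bool) (target_minus_one_allowed : Bool) (out : List Int) : Decidable (Spec_get_min_max_num_groups survey_data target_group_size target_plus_one_allowed target_minus_one_allowed out) := by unfold Spec_get_min_max_num_groups; infer_instance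

-- ===== CLAIM (what is proved, stated in full; the proofs are below) =====
def Claim_equal_get_min_max_num_groups : Prop := ∀ (survey_data : List Int) (target_group_size : Int) (target_plus_one_allowed : Bool) (target_minus_one_allowed : Bool), Dom_get_min_max_num_groups survey_data target_group_size target_plus_one_allowed target_minus_one_allowed → Spec_get_min_max_num_groups survey_data target_group_size target_plus_one_allowed target_minus_one_allowed (get_min_max_num_groups survey_data target_group_size target_plus_one_allowed target_minus_one_allowed)

-- ===== LEMMAS AND PROOFS =====

-- filtering an integer range by an interval predicate yields the sub-range
lemma filter_pyRange_interval (lo hi a b : Int) (ha : a ≤ lo) (hab : lo ≤ hi + 1) (hb : hi + 1 ≤ b)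
    (p : Int → Bool) (hp : ∀ g, a ≤ g → g < b → (p g = true ↔ (lo ≤ g ∧ g ≤ hi))) :
    (PySem.List.pyRange a b 1).filter p = PySem.List.pyRange lo (hi + 1) 1 := by
  rw [PySem.List.pyRange_one_append a lo b ha (by omega),
      PySem.List.pyRange_one_append lo (hi + 1) b hab hb,
      List.filter_append, List.filter_append]
  have h1 : (PySem.List.pyRange a lo 1).filter p = [] := by
    rw [List.filter_eq_nil_iff]
    intro g hg
    rw [PySem.List.mem_pyRange_one] at hg
    cases hpg : p g with
    | false => simp
    | true => exact absurd ((hp g hg.1 (by omega)).mp hpg) (by omega)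
  have h2 : (PySem.List.pyRange lo (hi + 1) 1).filter p = PySem.List.pyRange lo (hi + 1) 1 := by
    rw [List.filter_eq_self]
    intro g hg
    rw [PySem.List.mem_pyRange_one] at hg
    exact (hp g (by omega) (by omega)).mpr (by omega)
  have h3 : (PySem.List.pyRange (hi + 1) b 1).filter p = [] := by
    rw [List.filter_eq_nil_iff]
    intro g hg
    rw [PySem.List.mem_pyRange_one] at hg
    cases hpg : p g with
    | false => simp
    | true => exact absurd ((hp g (by omega) hg.2).mp hpg) (by omega)
  rw [h1, h2, h3, List.nil_append, List.append_nil]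

theorem get_min_max_num_groups_spec : Claim_equal_get_min_max_num_groups := by
  intro sd t p m _
  unfold Spec_get_min_max_num_groups get_min_max_num_groups get_min_max_num_groups_alt
  by_cases hbad : t ≤ 0 ∨ (sd.length : Int) < 1
  · have hbad' : t ≤ 0 ∨ sd.length < 1 := by omega
    simp only [if_pos hbad, if_pos hbad']
  · have hbad' : ¬ (t ≤ 0 ∨ sd.length < 1) := by omega
    simp only [if_neg hbad, if_neg hbad']
    have ht : 0 < t := by omega
    have hn : 1 ≤ (sd.length : Int) := by omega
    set n : Int := (sd.length : Int) with hndef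
    have hmineq : (if m ∧ t - 1 > 0 then t - 1 else t) = (if m ∧ t > 1 then t - 1 else t) := by
      by_cases hm : m ∧ t > 1
      · rw [if_pos hm, if_pos (⟨hm.1, by omega⟩ : m ∧ t - 1 > 0)]
      · rw [if_neg hm, if_neg (fun h => hm ⟨h.1, by omega⟩ : ¬ (m ∧ t - 1 > 0))]
    set maxs : Int := if p then t + 1 else t with hmaxs
    set mins : Int := if m ∧ t - 1 > 0 then t - 1 else t with hmins
    have hmaxpos : 0 < maxs := by rw [hmaxs]; cases p <;> simp <;> omega
    have hminpos : 0 < mins := by rw [hmins]; split_ifs <;> omega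
    have hminle : mins ≤ maxs := by rw [hmins, hmaxs]; cases p <;> split_ifs <;> simp <;> omega
    set lo : Int := -(PySem.Int.floordiv (-n) maxs) with hlo
    set hi : Int := PySem.Int.floordiv n mins with hhi
    have hloc : (lo - 1) * maxs < n ∧ n ≤ lo * maxs :=
      (PySem.Int.neg_floordiv_neg_eq_iff_of_pos hmaxpos).mp rfl
    have hhic : hi * mins ≤ n ∧ n < (hi + 1) * mins :=
      (PySem.Int.floordiv_eq_iff_of_pos hminpos).mp rfl
    have hlo1 : 1 ≤ lo := by nlinarith [hloc.1]
    have hhin : hi ≤ n := by nlinarith [hhic.1, hhic.2]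
    have hhi0 : 0 ≤ hi := by nlinarith [hhic.2]
    -- A's feasibility loop never fires
    have hany : (PySem.List.pyRange lo (hi + 1) 1).any
        (fun g => decide (¬ ((mins * g ≤ n) ∧ (maxs * g ≥ n)))) = false := by
      rw [List.any_eq_false]
      intro g hg
      rw [PySem.List.mem_pyRange_one] at hg
      simp only [decide_eq_true_iff, not_not, ge_iff_le]
      constructor
      · calc mins * g ≤ mins * hi := by nlinarith [hg.2]
          _ ≤ n := by nlinarith [hhic.1]
      · calc n ≤ lo * maxs := hloc.2
          _ ≤ g * maxs := by nlinarith [hg.1]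
          _ = maxs * g := mul_comm _ _
    rw [hany]
    simp only [Bool.false_eq_true, if_false]
    -- B's filtered list is exactly the range [lo, hi]
    rw [← hmineq]
    have hfe : (PySem.List.pyRange 1 (n + 1) 1).filter
        (fun g => decide (mins * g ≤ n ∧ n ≤ maxs * g)) = PySem.List.pyRange lo (hi + 1) 1 := by
      by_cases hle : lo ≤ hi
      · apply filter_pyRange_interval lo hi 1 (n + 1) hlo1 (by omega) (by omega)
        intro g _ _
        simp only [decide_eq_true_iff]
        constructor
        · rintro ⟨h1, h2⟩
          constructor
          · nlinarith [hloc.1]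
          · nlinarith [hhic.2]
        · rintro ⟨h1, h2⟩
          constructor
          · calc mins * g ≤ mins * hi := by nlinarith
              _ ≤ n := by nlinarith [hhic.1]
          · calc n ≤ lo * maxs := hloc.2
              _ ≤ g * maxs := by nlinarith
              _ = maxs * g := mul_comm _ _
      · rw [PySem.List.pyRange_one_eq_nil (show hi + 1 ≤ lo by omega), List.filter_eq_nil_iff]
        intro g hg
        rw [PySem.List.mem_pyRange_one] at hg
        cases hpg : decide (mins * g ≤ n ∧ n ≤ maxs * g) with
        | false => simp
        | true =>
          exfalso
          have hfeas := of_decide_eq_true hpg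
          have hg1 : lo ≤ g := by nlinarith [hloc.1, hfeas.2]
          have hg2 : g ≤ hi := by nlinarith [hhic.2, hfeas.1]
          omega
    rw [hfe]
    by_cases hle : lo ≤ hi
    · rw [if_neg (by omega : ¬ lo > hi)]
      rw [show PySem.List.pyRange lo (hi + 1) 1 = lo :: PySem.List.pyRange (lo + 1) (hi + 1) 1
            from PySem.List.pyRange_one_cons (by omega)]
      have hlast : ∀ (h : lo :: PySem.List.pyRange (lo + 1) (hi + 1) 1 ≠ []),
          (lo :: PySem.List.pyRange (lo + 1) (hi + 1) 1).getLast h = hi := by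
        intro h
        have e : lo :: PySem.List.pyRange (lo + 1) (hi + 1) 1 = PySem.List.pyRange lo hi 1 ++ [hi] := by
          rw [← PySem.List.pyRange_one_cons (by omega : lo < hi + 1),
              PySem.List.pyRange_one_succ_right hle]
        have h2 : (lo :: PySem.List.pyRange (lo + 1) (hi + 1) 1).getLast? = some hi := by
          rw [e]; exact List.getLast?_concat
        rw [List.getLast?_eq_some_getLast h] at h2
        exact (Option.some.injEq _ _ ▸ h2)
      simp only [hlast]
    · rw [if_pos (by omega : lo > hi), PySem.List.pyRange_one_eq_nil (show hi + 1 ≤ lo by omega)]
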